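-- pv_equiv track=rewrite | github.com/limresgrp/GEqTrain | geqtrain/train/sampler.py | _group_by_ensemble
-- ===== SOURCE A (Python) =====
-- def _group_by_ensemble(n_observations, ensemble_indices):
--     """
--     Groups dataset indices by their ensemble index.
--     """
--     ensemble_dict = {}
--     offset = 0
--     for n_observations, ensemble_index in zip(n_observations, ensemble_indices):
--         if ensemble_index not in ensemble_dict:
--             ensemble_dict[ensemble_index] = []
--         ensemble_dict[ensemble_index].extend(list(range(offset, offset + n_observations)))  # Store all conformations
--         offset += n_observations
--
--     return list(ensemble_dict.values())
-- ===== SOURCE B (Python) =====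
-- def _group_by_ensemble(n_observations, ensemble_indices):
--     """
--     Groups dataset indices by their ensemble index.
--     Two-pass version: first a prefix-sum starts table, then one gathering
--     comprehension per distinct ensemble key (first-appearance order).
--     """
--     pairs = list(zip(n_observations, ensemble_indices))
--     starts = []
--     acc = 0
--     for n, _ in pairs:
--         starts.append(acc)
--         acc += n
--     keys = list(dict.fromkeys(e for _, e in pairs))
--     return [
--         [j for s, (n, e) in zip(starts, pairs) if e == key
--            for j in range(s, s + n)]
--         for key in keys
--     ]
-- ===== Notes on version B (the rewrite author's own statement) =====
-- stated objective: alternative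
-- what changed: Replaces A's single loop that interleaves offset accumulation with in-place dict-list extension by two separate passes: a prefix-sum starts table, then for each distinct ensemble key (first-appearance order, via dict.fromkeys) one gathering comprehension over the annotated entries.
import Mathlib
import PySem

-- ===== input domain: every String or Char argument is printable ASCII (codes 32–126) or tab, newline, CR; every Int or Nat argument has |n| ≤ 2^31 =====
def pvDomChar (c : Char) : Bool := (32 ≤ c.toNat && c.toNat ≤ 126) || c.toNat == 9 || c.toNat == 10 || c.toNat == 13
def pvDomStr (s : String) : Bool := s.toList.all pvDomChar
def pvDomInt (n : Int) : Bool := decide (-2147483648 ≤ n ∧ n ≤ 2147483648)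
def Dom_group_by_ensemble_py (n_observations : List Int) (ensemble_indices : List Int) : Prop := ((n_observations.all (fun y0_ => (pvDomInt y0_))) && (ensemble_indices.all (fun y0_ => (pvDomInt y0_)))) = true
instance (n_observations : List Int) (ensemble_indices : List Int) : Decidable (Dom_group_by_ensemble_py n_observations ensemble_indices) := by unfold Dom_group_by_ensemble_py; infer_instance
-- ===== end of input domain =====

-- B replaces A's single dict-accumulating loop by a prefix-sum starts table plus a
-- per-distinct-key gathering pass (objective: alternative decomposition, same results).

-- ===== PORT A =====
-- literal port of A: one loop over zip(n_observations, ensemble_indices) carrying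
-- (ensemble_dict, offset); 'if e not in d: d[e] = []' then 'd[e].extend(range(...))'.
def group_by_ensemble_py (n_observations : List Int) (ensemble_indices : List Int) : List (List Int) :=
  let st :=
    (n_observations.zip ensemble_indices).foldl
      (fun (s : PySem.Dict Int (List Int) × Int) p =>
        let d := s.1
        let off := s.2
        let d := if d.contains p.2 then d else d.insert p.2 ([] : List Int)
        let d := d.modify p.2 [] (fun l => l ++ PySem.List.pyRange off (off + p.1) 1)
        (d, off + p.1))
      (PySem.Dict.empty, 0)
  st.1.values

-- ===== PORT B =====
-- literal port of B (Source B): pairs = zip; starts by one prefix-sum pass; keys =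
-- list(dict.fromkeys(...)); then one gathering comprehension per key.
def group_by_ensemble_py_alt (n_observations : List Int) (ensemble_indices : List Int) : List (List Int) :=
  let pairs := n_observations.zip ensemble_indices
  let sa := pairs.foldl (fun (st : List Int × Int) p => (st.1 ++ [st.2], st.2 + p.1)) ([], 0)
  let starts := sa.1
  let keys := PySem.List.dedup (pairs.map (·.2))
  keys.map (fun k =>
    (starts.zip pairs).flatMap (fun t =>
      if t.2.2 == k then PySem.List.pyRange t.1 (t.1 + t.2.1) 1 else []))

-- ===== PRECONDITION & SPEC =====
def Spec_group_by_ensemble_py (n_observations : List Int) (ensemble_indices : List Int) (out : List (List Int)) : Prop := out = group_by_ensemble_py_alt n_observations ensemble_indices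
instance (n_observations : List Int) (ensemble_indices : List Int) (out : List (List Int)) : Decidable (Spec_group_by_ensemble_py n_observations ensemble_indices out) := by unfold Spec_group_by_ensemble_py; infer_instance

-- ===== CLAIM (what is proved, stated in full; the proofs are below) =====
def Claim_equal_group_by_ensemble_py : Prop := ∀ (n_observations : List Int) (ensemble_indices : List Int), Dom_group_by_ensemble_py n_observations ensemble_indices → Spec_group_by_ensemble_py n_observations ensemble_indices (group_by_ensemble_py n_observations ensemble_indices)

-- ===== LEMMAS AND PROOFS =====

-- pairs annotated with their running start offset
def pvWithStarts : Int → List (Int × Int) → List (Int × (Int × Int))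
  | _, [] => []
  | off, p :: rest => (off, p) :: pvWithStarts (off + p.1) rest

-- the starts list alone
def pvStartsList : Int → List (Int × Int) → List Int
  | _, [] => []
  | off, p :: rest => off :: pvStartsList (off + p.1) rest

theorem pv_guard_modify (d : PySem.Dict Int (List Int)) (e : Int) (f : List Int → List Int) :
    ((if d.contains e then d else d.insert e ([] : List Int)).modify e [] f) = d.modify e [] f := by
  by_cases h : d.contains e = true
  · simp [h]
  · simp only [h]
    simp [PySem.Dict.modify, PySem.Dict.getD_insert_self, PySem.Dict.insert_insert_self,
      PySem.Dict.getD_of_not_contains, h]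

theorem pv_afold_eq (pairs : List (Int × Int)) :
    ∀ (d : PySem.Dict Int (List Int)) (off : Int),
    (pairs.foldl
      (fun (s : PySem.Dict Int (List Int) × Int) p =>
        let d := s.1
        let off := s.2
        let d := if d.contains p.2 then d else d.insert p.2 ([] : List Int)
        let d := d.modify p.2 [] (fun l => l ++ PySem.List.pyRange off (off + p.1) 1)
        (d, off + p.1))
      (d, off)).1
    = (pvWithStarts off pairs).foldl
        (fun d t => d.modify t.2.2 [] (fun l => l ++ PySem.List.pyRange t.1 (t.1 + t.2.1) 1)) d := by
  induction pairs with
  | nil => intro d off; rfl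
  | cons p rest ih =>
      intro d off
      refine (ih _ (off + p.1)).trans ?_
      rw [pv_guard_modify]
      rfl

theorem pv_bfold_starts (pairs : List (Int × Int)) :
    ∀ (st : List Int) (acc : Int),
    (pairs.foldl (fun (s : List Int × Int) p => (s.1 ++ [s.2], s.2 + p.1)) (st, acc)).1
      = st ++ pvStartsList acc pairs := by
  induction pairs with
  | nil => intro st acc; simp [pvStartsList]
  | cons p rest ih =>
      intro st acc
      simp [pvStartsList, ih, List.append_assoc]

theorem pv_zip_starts (pairs : List (Int × Int)) :
    ∀ off : Int, (pvStartsList off pairs).zip pairs = pvWithStarts off pairs := by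
  induction pairs with
  | nil => intro off; rfl
  | cons p rest ih => intro off; simp [pvStartsList, pvWithStarts, ih]

theorem pv_withStarts_map_key (pairs : List (Int × Int)) :
    ∀ off : Int, (pvWithStarts off pairs).map (·.2.2) = pairs.map (·.2) := by
  induction pairs with
  | nil => intro off; rfl
  | cons p rest ih => intro off; simp [pvWithStarts, ih]

-- getD of the triple-level modify-append fold
theorem pv_getD_fold (tri : List (Int × (Int × Int))) :
    ∀ (d : PySem.Dict Int (List Int)) (c : Int),
    ((tri.foldl
        (fun d t => d.modify t.2.2 [] (fun l => l ++ PySem.List.pyRange t.1 (t.1 + t.2.1) 1)) d).getD c [])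
      = d.getD c [] ++ tri.flatMap (fun t => if t.2.2 == c then PySem.List.pyRange t.1 (t.1 + t.2.1) 1 else []) := by
  induction tri with
  | nil => intro d c; simp
  | cons t rest ih =>
      intro d c
      simp only [List.foldl_cons, ih, List.flatMap_cons]
      rw [PySem.Dict.getD_modify]
      by_cases h : c = t.2.2
      · simp [h, List.append_assoc]
      · simp [h, Ne.symm h]

theorem pv_keys_fold (tri : List (Int × (Int × Int))) :
    ((tri.foldl
        (fun d t => d.modify t.2.2 [] (fun l => l ++ PySem.List.pyRange t.1 (t.1 + t.2.1) 1))
        (PySem.Dict.empty : PySem.Dict Int (List Int))).keys)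
      = PySem.Set.ofList (tri.map (·.2.2)) := by
  rw [PySem.Dict.keys_foldl_modify_key tri (fun t => t.2.2) ([] : List Int)
      (fun _ t l => l ++ PySem.List.pyRange t.1 (t.1 + t.2.1) 1) PySem.Dict.empty]
  simp [PySem.Set.update, PySem.Set.ofList, PySem.Dict.keys_empty, PySem.Set.empty]

theorem pv_nodup_keys_fold (tri : List (Int × (Int × Int))) :
    ((tri.foldl
        (fun d t => d.modify t.2.2 [] (fun l => l ++ PySem.List.pyRange t.1 (t.1 + t.2.1) 1))
        (PySem.Dict.empty : PySem.Dict Int (List Int))).keys).Nodup := by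
  exact PySem.Dict.nodup_keys_foldl_modify_key tri (fun t => t.2.2) ([] : List Int)
    (fun _ t l => l ++ PySem.List.pyRange t.1 (t.1 + t.2.1) 1) PySem.Dict.empty
    (by simp [PySem.Dict.keys_empty])

-- ===== VERDICT (by name: the statement is the Claim_ definition above) =====
theorem group_by_ensemble_py_spec : Claim_equal_group_by_ensemble_py := by
  intro ns es _
  unfold Spec_group_by_ensemble_py group_by_ensemble_py group_by_ensemble_py_alt
  simp only []
  set pairs := ns.zip es with hpairs
  set tri := pvWithStarts 0 pairs with htri
  rw [pv_afold_eq pairs PySem.Dict.empty 0]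
  rw [pv_bfold_starts pairs [] 0, List.nil_append, pv_zip_starts pairs 0]
  set F := fun (d : PySem.Dict Int (List Int)) (t : Int × (Int × Int)) =>
    d.modify t.2.2 [] (fun l => l ++ PySem.List.pyRange t.1 (t.1 + t.2.1) 1) with hF
  have hnd := pv_nodup_keys_fold tri
  rw [PySem.Dict.values_eq_map_keys _ hnd ([] : List Int)]
  rw [pv_keys_fold tri]
  rw [PySem.List.dedup_eq_ofList]
  rw [show tri.map (·.2.2) = pairs.map (·.2) from pv_withStarts_map_key pairs 0]
  apply List.map_congr_left
  intro k _
  exact pv_getD_fold tri PySem.Dict.empty k
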